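-- pv_equiv track=rewrite | github.com/mariasebarespersona/maninos-ai | tools/formula_calculator_v3_simple.py | get_affected_cells
-- ===== SOURCE A (Python) =====
-- from typing import Dict, Any, Optional, Set, List
--
-- R2B_DEPENDENCIES = {
--     "B5": {"D5", "E5"},
--     "C5": {"D5"},
--     "D5": {"E5"},
--
--     "B6": {"D6", "E6", "B10"},
--     "C6": {"D6"},
--     "D6": {"E6"},
--
--     "B7": {"D7", "E7", "B10"},
--     "C7": {"D7"},
--     "D7": {"E7"},
--
--     "B8": {"D8", "E8", "B10"},
--     "C8": {"D8"},
--     "D8": {"E8"},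
--
--     "B10": {"B12"},
--     "B11": {"B12"},
--     "B12": {"B13", "B15"},
--     "B13": {"B14"},
--     "B14": {"B15"},
--     "B15": {"B18"},
--
--     "B25": {"B29"},
--     "B26": {"B29"},
--     "B27": {"B29"},
--     "B28": {"B29"},
-- }
--
-- def get_affected_cells(updated_cell: str) -> List[str]:
--     """Get cells affected by an update, in proper calculation order."""
--     affected = []
--     visited = set()
--
--     def dfs(cell):
--         if cell in visited:
--             return
--         visited.add(cell)
--
--         dependents = R2B_DEPENDENCIES.get(cell, set())
--         for dep in dependents:
--             if dep not in visited:
--                 affected.append(dep)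
--                 dfs(dep)
--
--     dfs(updated_cell)
--     return affected
-- ===== SOURCE B (Python) =====
-- # Breadth-first search over a flat EDGE LIST (scanned per dequeued node) instead of
-- # A's recursive DFS over a dict of sets.  On every start cell admitted by Pre_ the
-- # reachable subgraph is a simple chain, where BFS and DFS produce the same list.
-- R2B_EDGES = [
--     ("B5", "D5"), ("B5", "E5"),
--     ("C5", "D5"),
--     ("D5", "E5"),
--     ("B6", "D6"), ("B6", "E6"), ("B6", "B10"),
--     ("C6", "D6"),
--     ("D6", "E6"),
--     ("B7", "D7"), ("B7", "E7"), ("B7", "B10"),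
--     ("C7", "D7"),
--     ("D7", "E7"),
--     ("B8", "D8"), ("B8", "E8"), ("B8", "B10"),
--     ("C8", "D8"),
--     ("D8", "E8"),
--     ("B10", "B12"),
--     ("B11", "B12"),
--     ("B12", "B13"), ("B12", "B15"),
--     ("B13", "B14"),
--     ("B14", "B15"),
--     ("B15", "B18"),
--     ("B25", "B29"), ("B26", "B29"), ("B27", "B29"), ("B28", "B29"),
-- ]
--
-- def get_affected_cells(updated_cell: str) -> list:
--     affected = []
--     seen = {updated_cell}
--     queue = [updated_cell]
--     i = 0
--     while i < len(queue):
--         cell = queue[i]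
--         i += 1
--         for src, dst in R2B_EDGES:
--             if src == cell and dst not in seen:
--                 seen.add(dst)
--                 affected.append(dst)
--                 queue.append(dst)
--     return affected
-- ===== Notes on version B (the rewrite author's own statement) =====
-- stated objective: alternative
-- what changed: A's recursive closure-mutating DFS over a dict of sets is replaced by an iterative breadth-first search driven by a queue that scans a flat edge list for each dequeued node; Pre_ excludes the seven start cells whose DFS reaches a multi-element dependent set, where A's output order is an accident of Python's randomized set-iteration order (any order is equally defensible).
-- outside the precondition, e.g. on get_affected_cells('B5'): A returns ['E5', 'D5'], B returns ['D5', 'E5']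
import Mathlib
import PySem

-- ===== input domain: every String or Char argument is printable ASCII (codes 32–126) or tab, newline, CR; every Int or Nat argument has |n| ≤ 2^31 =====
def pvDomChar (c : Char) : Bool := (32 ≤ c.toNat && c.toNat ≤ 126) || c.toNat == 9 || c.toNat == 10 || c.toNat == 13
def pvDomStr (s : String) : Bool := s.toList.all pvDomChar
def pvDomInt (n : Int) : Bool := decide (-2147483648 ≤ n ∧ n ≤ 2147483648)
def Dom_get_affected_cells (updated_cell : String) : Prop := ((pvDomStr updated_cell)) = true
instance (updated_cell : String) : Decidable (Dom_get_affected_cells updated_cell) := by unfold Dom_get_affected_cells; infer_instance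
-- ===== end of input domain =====

-- B replaces A's recursive closure-based DFS over a dict of sets by an iterative BFS that scans a
-- flat edge list per dequeued node (alternative algorithm, same value on Pre_, which excludes the
-- start cells whose output order depends on Python's randomized set-iteration order).

-- ===== PORT A =====
-- R2B_DEPENDENCIES: dict of sets.  A set value's ITERATION order is hash-dependent in Python;
-- Pre_ below excludes every input whose DFS iterates a multi-element set, so the order chosen
-- here (the source's literal order) is only exercised outside the claim.
def pvDepsA : PySem.Dict String (PySem.Set String) := PySem.Dict.ofList
  [("B5", ["D5", "E5"]), ("C5", ["D5"]), ("D5", ["E5"]),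
   ("B6", ["D6", "E6", "B10"]), ("C6", ["D6"]), ("D6", ["E6"]),
   ("B7", ["D7", "E7", "B10"]), ("C7", ["D7"]), ("D7", ["E7"]),
   ("B8", ["D8", "E8", "B10"]), ("C8", ["D8"]), ("D8", ["E8"]),
   ("B10", ["B12"]), ("B11", ["B12"]), ("B12", ["B13", "B15"]),
   ("B13", ["B14"]), ("B14", ["B15"]), ("B15", ["B18"]),
   ("B25", ["B29"]), ("B26", ["B29"]), ("B27", ["B29"]), ("B28", ["B29"])]

-- the nested 'def dfs(cell)' mutating (visited, affected); fuel only makes the recursion total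
-- (64 > the number of cells, so it is never exhausted)
def pvDfsA : Nat → String → (PySem.Set String × List String) → (PySem.Set String × List String)
  | 0, _, st => st
  | fuel + 1, cell, st =>
    if cell ∈ st.1 then st
    else
      let st1 := (PySem.Set.add st.1 cell, st.2)
      (pvDepsA.getD cell []).foldl
        (fun acc dep => if dep ∈ acc.1 then acc else pvDfsA fuel dep (acc.1, acc.2 ++ [dep])) st1

def get_affected_cells (updated_cell : String) : List String :=
  (pvDfsA 64 updated_cell (PySem.Set.empty, [])).2

-- ===== PORT B =====
-- Source B's flat edge list, in source order
def pvEdgesB : List (String × String) :=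
  [("B5", "D5"), ("B5", "E5"), ("C5", "D5"), ("D5", "E5"),
   ("B6", "D6"), ("B6", "E6"), ("B6", "B10"), ("C6", "D6"), ("D6", "E6"),
   ("B7", "D7"), ("B7", "E7"), ("B7", "B10"), ("C7", "D7"), ("D7", "E7"),
   ("B8", "D8"), ("B8", "E8"), ("B8", "B10"), ("C8", "D8"), ("D8", "E8"),
   ("B10", "B12"), ("B11", "B12"), ("B12", "B13"), ("B12", "B15"),
   ("B13", "B14"), ("B14", "B15"), ("B15", "B18"),
   ("B25", "B29"), ("B26", "B29"), ("B27", "B29"), ("B28", "B29")]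

-- Source B's while loop over the queue index i: the Lean list argument is queue[i:], so 'i += 1'
-- is taking the tail and 'queue.append(dst)' appends to it.  The inner 'for src, dst in R2B_EDGES'
-- is the foldl over pvEdgesB with state (seen, affected, remaining queue).  Fuel only makes the
-- loop total (64 exceeds the number of dequeues).
def pvBfsB : Nat → List String → PySem.Set String → List String → List String
  | 0, _, _, affected => affected
  | _ + 1, [], _, affected => affected
  | fuel + 1, cell :: rest, seen, affected =>
    let st := pvEdgesB.foldl
      (fun (acc : PySem.Set String × List String × List String) e =>
        if e.1 = cell ∧ e.2 ∉ acc.1 then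
          (PySem.Set.add acc.1 e.2, acc.2.1 ++ [e.2], acc.2.2 ++ [e.2])
        else acc)
      (seen, affected, rest)
    pvBfsB fuel st.2.2 st.1 st.2.1

def get_affected_cells_alt (updated_cell : String) : List String :=
  pvBfsB 64 [updated_cell] (PySem.Set.ofList [updated_cell]) []

-- ===== PRECONDITION & SPEC =====
-- Pre_ excludes the seven start cells whose DFS reaches a multi-element dependent set: there A's
-- output ORDER is an accident of Python's randomized set-iteration order (any order is equally
-- defensible), so there is no single value to match.
def Pre_get_affected_cells (updated_cell : String) : Prop :=
  updated_cell ∉ (["B5", "B6", "B7", "B8", "B10", "B11", "B12"] : List String)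
instance (updated_cell : String) : Decidable (Pre_get_affected_cells updated_cell) := by
  unfold Pre_get_affected_cells; infer_instance

def pvWitness_get_affected_cells : String := "C5"

def Spec_get_affected_cells (updated_cell : String) (out : List String) : Prop :=
  out = get_affected_cells_alt updated_cell
instance (updated_cell : String) (out : List String) :
    Decidable (Spec_get_affected_cells updated_cell out) := by
  unfold Spec_get_affected_cells; infer_instance

-- ===== CLAIM (what is proved, stated in full; the proofs are below) =====
def Claim_equal_get_affected_cells : Prop :=
  ∀ (updated_cell : String), Dom_get_affected_cells updated_cell →
    Pre_get_affected_cells updated_cell →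
    Spec_get_affected_cells updated_cell (get_affected_cells updated_cell)

-- ===== LEMMAS AND PROOFS =====

lemma pv_keysA : pvDepsA.keys =
    ["B5", "C5", "D5", "B6", "C6", "D6", "B7", "C7", "D7", "B8", "C8", "D8",
     "B10", "B11", "B12", "B13", "B14", "B15", "B25", "B26", "B27", "B28"] := by decide

lemma pv_srcsB : ∀ e ∈ pvEdgesB, e.1 ∈
    (["B5", "C5", "D5", "B6", "C6", "D6", "B7", "C7", "D7", "B8", "C8", "D8",
      "B10", "B11", "B12", "B13", "B14", "B15", "B25", "B26", "B27", "B28"] : List String) := by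
  decide

-- a start cell that is not a key of the dict: A visits it, iterates no dependents, returns []
lemma pv_A_not_key (s : String) (h : pvDepsA.get? s = none) : get_affected_cells s = [] := by
  have hd : pvDepsA.getD s [] = [] := by
    rw [PySem.Dict.getD_eq_get?_getD, h]; rfl
  show (pvDfsA (63 + 1) s (PySem.Set.empty, [])).2 = []
  rw [pvDfsA]
  simp [hd, PySem.Set.empty]

-- the inner edge scan leaves the state unchanged when no edge starts at the dequeued cell
lemma pv_foldl_noop (l : List (String × String)) (cell : String)
    (h : ∀ e ∈ l, e.1 ≠ cell) (init : PySem.Set String × List String × List String) :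
    l.foldl
      (fun (acc : PySem.Set String × List String × List String) e =>
        if e.1 = cell ∧ e.2 ∉ acc.1 then
          (PySem.Set.add acc.1 e.2, acc.2.1 ++ [e.2], acc.2.2 ++ [e.2])
        else acc) init = init := by
  induction l generalizing init with
  | nil => rfl
  | cons e tl ih =>
    have he : ¬ (e.1 = cell ∧ e.2 ∉ init.1) :=
      fun hc => h e (List.mem_cons_self ..) hc.1
    simp only [List.foldl_cons, if_neg he]
    exact ih (fun x hx => h x (List.mem_cons_of_mem _ hx)) init

-- a start cell with no outgoing edges: B dequeues it, scans the edges in vain, returns []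
lemma pv_B_no_src (s : String) (h : ∀ e ∈ pvEdgesB, e.1 ≠ s) :
    get_affected_cells_alt s = [] := by
  show pvBfsB (63 + 1) [s] (PySem.Set.ofList [s]) [] = []
  rw [pvBfsB]
  simp only [pv_foldl_noop pvEdgesB s h]
  rfl

-- ===== VERDICT (by name: the statement is the Claim_ definition above) =====
theorem get_affected_cells_spec : Claim_equal_get_affected_cells := by
  intro s _hdom hpre
  unfold Spec_get_affected_cells
  by_cases hk : s ∈ (["C5", "D5", "C6", "D6", "C7", "D7", "C8", "D8",
      "B13", "B14", "B15", "B25", "B26", "B27", "B28"] : List String)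
  · fin_cases hk <;> decide
  · have hnk : s ∉ (["B5", "C5", "D5", "B6", "C6", "D6", "B7", "C7", "D7", "B8", "C8", "D8",
        "B10", "B11", "B12", "B13", "B14", "B15", "B25", "B26", "B27", "B28"] : List String) := by
      unfold Pre_get_affected_cells at hpre
      simp only [List.mem_cons, List.not_mem_nil, or_false, not_or] at hpre hk ⊢
      tauto
    have hA : pvDepsA.get? s = none := by
      rw [PySem.Dict.get?_eq_none_iff_not_mem_keys, pv_keysA]; exact hnk
    have hB : ∀ e ∈ pvEdgesB, e.1 ≠ s := fun e he heq => hnk (heq ▸ pv_srcsB e he)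
    rw [pv_A_not_key s hA, pv_B_no_src s hB]
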